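-- pv_equiv track=rewrite | github.com/BTCElectrician/omhni-oracle-template | services/extraction_service.py | _prioritize_electrical_tables
-- ===== SOURCE A (Python) =====
-- from typing import Dict, List, Any, Optional, Tuple
--
-- def _prioritize_electrical_tables(tables: List[Dict[str, Any]]) -> List[Dict[str, Any]]:
--     """Prioritize electrical tables - panel schedules first."""
--     # Prioritize tables likely to be panel schedules
--     panel_tables = []
--     other_tables = []
--
--     for table in tables:
--         content = table.get("content", "").lower()
--         if "circuit" in content or "panel" in content:
--             panel_tables.append(table)
--         else:
--             other_tables.append(table)
--
--     return panel_tables + other_tables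
-- ===== SOURCE B (Python) =====
-- from typing import Dict, List, Any
--
-- def _prioritize_electrical_tables(tables: List[Dict[str, Any]]) -> List[Dict[str, Any]]:
--     """Prioritize electrical tables - panel schedules first (stable 0/1-key sort)."""
--     def key(table):
--         content = table.get("content", "").lower()
--         return 0 if ("circuit" in content or "panel" in content) else 1
--     return sorted(tables, key=key)
-- ===== Notes on version B (the rewrite author's own statement) =====
-- stated objective: idiomatic
-- what changed: Replaces the two-accumulator partition-and-concatenate loop with a single stable sort on a 0/1 key (panel-schedule tables key 0, others key 1); stability makes sorted(tables, key) equal the original concatenation.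
import Mathlib
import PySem

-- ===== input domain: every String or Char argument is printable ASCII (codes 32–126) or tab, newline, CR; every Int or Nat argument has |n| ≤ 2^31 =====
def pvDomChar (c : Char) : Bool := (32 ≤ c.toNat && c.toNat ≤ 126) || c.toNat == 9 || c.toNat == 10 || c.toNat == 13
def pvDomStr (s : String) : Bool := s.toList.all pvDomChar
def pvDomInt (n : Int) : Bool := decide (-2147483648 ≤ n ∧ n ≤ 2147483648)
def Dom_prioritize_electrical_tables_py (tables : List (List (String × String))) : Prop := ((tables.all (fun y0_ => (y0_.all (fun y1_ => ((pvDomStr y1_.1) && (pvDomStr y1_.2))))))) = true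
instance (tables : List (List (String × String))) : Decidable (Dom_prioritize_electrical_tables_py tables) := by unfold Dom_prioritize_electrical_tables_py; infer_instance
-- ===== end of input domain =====

-- B replaces A's two-accumulator partition with a single stable 0/1-key sort (idiomatic; same result by stability).

-- ===== PORT A =====
-- shared with B: the condition both Pythons test with the identical expression
-- table.get("content", "").lower() containing "circuit" or "panel"
def pvIsPanel (t : List (String × String)) : Bool :=
  let content := PySem.Str.lower (PySem.Dict.getD (PySem.Dict.mk t) "content" "")
  PySem.Str.isIn "circuit" content || PySem.Str.isIn "panel" content

def prioritize_electrical_tables_py (tables : List (List (String × String))) : List (List (String × String)) :=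
  let acc := tables.foldl
    (fun (acc : List (List (String × String)) × List (List (String × String))) table =>
      if pvIsPanel table then (acc.1 ++ [table], acc.2) else (acc.1, acc.2 ++ [table]))
    ([], [])
  acc.1 ++ acc.2

-- ===== PORT B =====
def pvKey (t : List (String × String)) : Int := if pvIsPanel t then 0 else 1

def prioritize_electrical_tables_py_alt (tables : List (List (String × String))) : List (List (String × String)) :=
  PySem.List.sorted tables pvKey

-- ===== PRECONDITION & SPEC =====
def Spec_prioritize_electrical_tables_py (tables : List (List (String × String))) (out : List (List (String × String))) : Prop := out = prioritize_electrical_tables_py_alt tables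
instance (tables : List (List (String × String))) (out : List (List (String × String))) : Decidable (Spec_prioritize_electrical_tables_py tables out) := by unfold Spec_prioritize_electrical_tables_py; infer_instance

-- ===== CLAIM (what is proved, stated in full; the proofs are below) =====
def Claim_equal_prioritize_electrical_tables_py : Prop := ∀ (tables : List (List (String × String))), Dom_prioritize_electrical_tables_py tables → Spec_prioritize_electrical_tables_py tables (prioritize_electrical_tables_py tables)

-- ===== LEMMAS AND PROOFS =====

-- A's loop from a pair of accumulators: it appends the panel tables to the first
-- component and the others to the second.
lemma pvA_loop (tables : List (List (String × String)))
    (P O : List (List (String × String))) :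
    tables.foldl
      (fun (acc : List (List (String × String)) × List (List (String × String))) table =>
        if pvIsPanel table then (acc.1 ++ [table], acc.2) else (acc.1, acc.2 ++ [table]))
      (P, O)
    = (P ++ tables.filter pvIsPanel, O ++ tables.filter (fun t => !pvIsPanel t)) := by
  induction tables generalizing P O with
  | nil => simp
  | cons t ts ih =>
    by_cases h : pvIsPanel t = true <;>
      simp [List.foldl_cons, h, ih, List.append_assoc]

-- inserting a panel table into "panels ++ others" puts it right after the panels
lemma pvInsert_panel (t : List (String × String)) (ht : pvIsPanel t = true)
    (P O : List (List (String × String)))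
    (hP : ∀ p ∈ P, pvIsPanel p = true) (hO : ∀ o ∈ O, pvIsPanel o = false) :
    PySem.List.insertBy (fun a b => decide (pvKey a < pvKey b)) t (P ++ O)
      = P ++ t :: O := by
  induction P with
  | nil =>
    cases O with
    | nil => simp [PySem.List.insertBy]
    | cons o os =>
      have ho : pvIsPanel o = false := hO o (by simp)
      simp [PySem.List.insertBy, pvKey, ht, ho]
  | cons p ps ih =>
    have hp : pvIsPanel p = true := hP p (by simp)
    have hb : decide (pvKey t < pvKey p) = false := by simp [pvKey, ht, hp]
    simp only [List.cons_append, PySem.List.insertBy, hb, Bool.false_eq_true, if_false]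
    rw [ih (fun q hq => hP q (by simp [hq]))]

-- B's insertion-sort loop from an accumulator "panels ++ others"
lemma pvB_loop (tables : List (List (String × String)))
    (P O : List (List (String × String)))
    (hP : ∀ p ∈ P, pvIsPanel p = true) (hO : ∀ o ∈ O, pvIsPanel o = false) :
    tables.foldl
      (fun acc x => PySem.List.insertBy (fun a b => decide (pvKey a < pvKey b)) x acc)
      (P ++ O)
    = (P ++ tables.filter pvIsPanel) ++ (O ++ tables.filter (fun t => !pvIsPanel t)) := by
  induction tables generalizing P O with
  | nil => simp
  | cons t ts ih =>
    have hPfilter : ∀ p ∈ ts.filter pvIsPanel, pvIsPanel p = true := by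
      intro p hp; exact (List.mem_filter.1 hp).2
    by_cases h : pvIsPanel t = true
    · have hP' : ∀ p ∈ P ++ [t], pvIsPanel p = true := by
        intro p hp
        rcases List.mem_append.1 hp with h' | h'
        · exact hP p h'
        · simpa [List.mem_singleton.1 h'] using h
      have step := pvInsert_panel t h P O hP hO
      have assoc : P ++ t :: O = (P ++ [t]) ++ O := by simp
      rw [List.foldl_cons, step, assoc, ih (P ++ [t]) O hP' hO]
      simp [h, List.append_assoc]
    · have h' : pvIsPanel t = false := by simpa using h
      have hO' : ∀ o ∈ O ++ [t], pvIsPanel o = false := by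
        intro o ho
        rcases List.mem_append.1 ho with hh | hh
        · exact hO o hh
        · simpa [List.mem_singleton.1 hh] using h'
      have hnb : ∀ y ∈ P ++ O, (fun a b => decide (pvKey a < pvKey b)) t y = false := by
        intro y hy
        simp only [pvKey, h']
        by_cases hyP : pvIsPanel y = true <;> simp [hyP]
      rw [List.foldl_cons, PySem.List.insertBy_of_forall_not_before _ t (P ++ O) hnb,
        List.append_assoc, ih P (O ++ [t]) hP hO']
      simp [h', List.append_assoc]

-- ===== VERDICT (by name: the statement is the Claim_ definition above) =====
theorem prioritize_electrical_tables_py_spec : Claim_equal_prioritize_electrical_tables_py := by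
  intro tables _
  unfold Spec_prioritize_electrical_tables_py prioritize_electrical_tables_py
    prioritize_electrical_tables_py_alt
  rw [PySem.List.sorted_eq_foldl_insertBy]
  have hA := pvA_loop tables [] []
  have hB := pvB_loop tables [] [] (by simp) (by simp)
  simp only [List.nil_append, List.append_nil] at hA hB ⊢
  rw [hA, hB]
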